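-- pv_equiv track=rewrite | github.com/paul-tqh-nguyen/joel_spolsky_text_generator | models.py | _input_output_pairs_from_blog_text
-- ===== SOURCE A (Python) =====
-- from typing import List, Callable, Tuple
--
-- def _input_output_pairs_from_blog_text(blog_text: str, char2idx: dict, input_string_length: int) -> List[Tuple[List[int], int]]:
--     pairs: List[Tuple[List[int], int]] = []
--     for snippet_index in range(len(blog_text)-input_string_length):
--         input_example = blog_text[snippet_index:snippet_index+input_string_length]
--         input_example = [char2idx[char] for char in input_example]
--         output_example = blog_text[snippet_index+input_string_length]
--         output_example = char2idx[output_example]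
--         input_output_pair = (input_example, output_example)
--         pairs.append(input_output_pair)
--     return pairs
-- ===== SOURCE B (Python) =====
-- def _input_output_pairs_from_blog_text(blog_text: str, char2idx: dict, input_string_length: int):
--     L = input_string_length
--     if len(blog_text) <= L:
--         return []
--     pairs = []
--     # seed the rolling window with the first L encoded characters
--     window = [char2idx[c] for c in blog_text[:L]]
--     # one streaming pass: each remaining character closes one pair and rolls the window
--     for c in blog_text[L:]:
--         code = char2idx[c]
--         pairs.append((window, code))
--         window = (window + [code])[1:]
--     return pairs
-- ===== Notes on version B (the rewrite author's own statement) =====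
-- stated objective: alternative
-- what changed: B replaces A's per-index re-encoding of each window slice by a single streaming pass that maintains a rolling encoded window (seeded from the first L chars, updated by drop-front/append per character), encoding each character exactly once.
-- outside the precondition, e.g. on _input_output_pairs_from_blog_text('ab', {'a': 0, 'b': 1}, -1): A returns [([0], 1), ([], 0), ([], 1)], B returns [([0], 1)]
import Mathlib
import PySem

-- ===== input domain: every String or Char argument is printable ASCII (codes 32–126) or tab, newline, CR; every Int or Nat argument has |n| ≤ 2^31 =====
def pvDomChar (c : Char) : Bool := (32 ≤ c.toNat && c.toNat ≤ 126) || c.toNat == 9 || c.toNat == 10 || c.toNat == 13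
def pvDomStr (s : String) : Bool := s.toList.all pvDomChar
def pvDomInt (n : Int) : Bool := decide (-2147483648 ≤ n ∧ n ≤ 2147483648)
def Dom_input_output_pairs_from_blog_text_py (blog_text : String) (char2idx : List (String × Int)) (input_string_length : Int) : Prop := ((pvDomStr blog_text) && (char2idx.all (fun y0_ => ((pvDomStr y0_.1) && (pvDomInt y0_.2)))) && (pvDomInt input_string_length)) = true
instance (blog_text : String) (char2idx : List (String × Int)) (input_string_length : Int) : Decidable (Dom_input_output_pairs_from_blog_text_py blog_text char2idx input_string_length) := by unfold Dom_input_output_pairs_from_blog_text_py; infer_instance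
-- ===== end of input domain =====

-- B replaces A's per-window re-encoding (each char looked up L times) by one streaming pass
-- maintaining a rolling encoded window; objective: alternative (one dict lookup per character).

-- shared helper: char2idx[c] (dict with single-character string keys; first match)
def pvLookup (char2idx : List (String × Int)) (c : Char) : Option Int :=
  (char2idx.find? (fun p => p.1 == String.singleton c)).map (·.2)

-- ===== PORT A =====
def input_output_pairs_from_blog_text_py (blog_text : String) (char2idx : List (String × Int)) (input_string_length : Int) : List (List Int × Int) :=
  (PySem.List.pyRange 0 ((PySem.Str.len blog_text) - input_string_length) 1).foldl
    (fun pairs snippet_index =>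
      let input_example := PySem.List.slice blog_text.toList (some snippet_index) (some (snippet_index + input_string_length))
      let input_example := input_example.map (fun c => (pvLookup char2idx c).getD 0)   -- KeyError excluded by Pre_
      let output_example := (PySem.Str.pyGet? blog_text (snippet_index + input_string_length)).getD ' '   -- IndexError excluded by Pre_
      let output_example := (pvLookup char2idx output_example).getD 0                                      -- KeyError excluded by Pre_
      pairs ++ [(input_example, output_example)]) []

-- ===== PORT B =====
def input_output_pairs_from_blog_text_py_alt (blog_text : String) (char2idx : List (String × Int)) (input_string_length : Int) : List (List Int × Int) :=
  if PySem.Str.len blog_text ≤ input_string_length then []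
  else
    let window := (PySem.List.slice blog_text.toList none (some input_string_length)).map
      (fun c => (pvLookup char2idx c).getD 0)                                           -- KeyError excluded by Pre_
    let st := (PySem.List.slice blog_text.toList (some input_string_length) none).foldl
      (fun (st : List (List Int × Int) × List Int) c =>
        let code := (pvLookup char2idx c).getD 0                                         -- KeyError excluded by Pre_
        (st.1 ++ [(st.2, code)], PySem.List.slice (st.2 ++ [code]) (some 1) none))
      ([], window)
    st.1

-- ===== PRECONDITION & SPEC =====
-- Pre_ excludes (a) texts containing a character that is not a key of char2idx while pairs are
-- generated, on which A raises KeyError, and (b) negative input_string_length with a longer text: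
-- a window length outside the function's purpose, where A's value (via Python's negative
-- slicing/indexing: empty windows, wrapped outputs) and B's differ and no caller would specify either.
def Pre_input_output_pairs_from_blog_text_py (blog_text : String) (char2idx : List (String × Int)) (input_string_length : Int) : Prop :=
  (PySem.Str.len blog_text ≤ input_string_length) ∨
  (0 ≤ input_string_length ∧
   blog_text.toList.all (fun c => (pvLookup char2idx c).isSome) = true)
instance (blog_text : String) (char2idx : List (String × Int)) (input_string_length : Int) : Decidable (Pre_input_output_pairs_from_blog_text_py blog_text char2idx input_string_length) := by unfold Pre_input_output_pairs_from_blog_text_py; infer_instance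

def pvWitness_input_output_pairs_from_blog_text_py : String × (List (String × Int)) × Int :=
  ("abca", [("a", 0), ("b", 1), ("c", 2)], 2)

def Spec_input_output_pairs_from_blog_text_py (blog_text : String) (char2idx : List (String × Int)) (input_string_length : Int) (out : List (List Int × Int)) : Prop := out = input_output_pairs_from_blog_text_py_alt blog_text char2idx input_string_length
instance (blog_text : String) (char2idx : List (String × Int)) (input_string_length : Int) (out : List (List Int × Int)) : Decidable (Spec_input_output_pairs_from_blog_text_py blog_text char2idx input_string_length out) := by unfold Spec_input_output_pairs_from_blog_text_py; infer_instance

-- ===== CLAIM (what is proved, stated in full; the proofs are below) =====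
def Claim_equal_input_output_pairs_from_blog_text_py : Prop := ∀ (blog_text : String) (char2idx : List (String × Int)) (input_string_length : Int), Dom_input_output_pairs_from_blog_text_py blog_text char2idx input_string_length → Pre_input_output_pairs_from_blog_text_py blog_text char2idx input_string_length → Spec_input_output_pairs_from_blog_text_py blog_text char2idx input_string_length (input_output_pairs_from_blog_text_py blog_text char2idx input_string_length)

-- ===== LEMMAS AND PROOFS =====

-- proof-side characterisation of B's rolling loop
def pvRoll (win : List Int) : List Int → List (List Int × Int)
  | [] => []
  | x :: t => (win, x) :: pvRoll ((win ++ [x]).tail) t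

theorem pv_fold_eq_roll (t : List Int) : ∀ (win : List Int) (acc : List (List Int × Int)),
    (t.foldl (fun (st : List (List Int × Int) × List Int) x =>
        (st.1 ++ [(st.2, x)], (st.2 ++ [x]).tail)) (acc, win)).1
      = acc ++ pvRoll win t := by
  induction t with
  | nil => intro win acc; simp [pvRoll]
  | cons x t ih =>
      intro win acc
      simp only [List.foldl_cons, pvRoll]
      rw [ih]
      simp

theorem pv_roll_windows (t : List Int) : ∀ (win : List Int),
    pvRoll win t = (List.range t.length).map
      (fun k => (((win ++ t).drop k).take win.length, ((win ++ t)[k + win.length]?).getD 0)) := by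
  induction t with
  | nil => intro win; simp [pvRoll]
  | cons x t ih =>
      intro win
      simp only [pvRoll, List.length_cons, List.range_succ_eq_map, List.map_cons, List.map_map]
      congr 1
      · simp
      · rw [ih]
        apply List.map_congr_left
        intro k _
        have h1 : (win ++ [x]).tail ++ t = (win ++ x :: t).drop 1 := by
          cases win <;> simp
        have h2 : ((win ++ [x]).tail).length = win.length := by simp
        simp only [Function.comp, h1, h2, Prod.mk.injEq]
        constructor
        · rw [List.drop_drop]
          simp [Nat.add_comm]
        · rw [List.getElem?_drop, show 1 + (k + win.length) = k.succ + win.length from by omega]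

theorem pv_slice_map {α β : Type} (f : α → β) (l : List α) (a b : Option Int) :
    PySem.List.slice (l.map f) a b = (PySem.List.slice l a b).map f := by
  cases a <;> cases b <;>
    simp [PySem.List.slice, PySem.List.clampIdx, List.map_drop, List.map_take]

theorem pv_str_get (s : String) (n : Nat) (h : n < s.toList.length) :
    PySem.Str.pyGet? s (n : Int) = some (s.toList[n]) := by
  simp [PySem.Str.pyGet?, PySem.List.pyGet?_natCast, List.getElem?_eq_getElem h]

theorem input_output_pairs_from_blog_text_py_spec : Claim_equal_input_output_pairs_from_blog_text_py := by
  intro blog_text char2idx L _hdom hpre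
  unfold Spec_input_output_pairs_from_blog_text_py
  unfold input_output_pairs_from_blog_text_py input_output_pairs_from_blog_text_py_alt
  by_cases h : PySem.Str.len blog_text ≤ L
  · rw [if_pos h, PySem.List.pyRange_one_eq_nil (by omega)]
    rfl
  · rw [if_neg h]
    obtain ⟨hL, hkeys⟩ : 0 ≤ L ∧ blog_text.toList.all (fun c => (pvLookup char2idx c).isSome) = true := by
      rcases hpre with h' | h'
      · exact absurd h' h
      · exact h'
    set enc : Char → Int := fun c => (pvLookup char2idx c).getD 0 with henc
    set e : List Int := blog_text.toList.map enc with he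
    obtain ⟨Ln, rfl⟩ : ∃ Ln : Nat, L = (Ln : Int) := ⟨L.toNat, (Int.toNat_of_nonneg hL).symm⟩
    have hlen : PySem.Str.len blog_text = (blog_text.toList.length : Int) := by
      simp [PySem.Str.len_eq]
    have hLlt : Ln < blog_text.toList.length := by
      rw [hlen] at h; exact_mod_cast not_le.mp h
    -- B side: fold over chars becomes fold over encoded codes, then pvRoll
    simp only [PySem.List.slice_from_natCast, PySem.List.slice_to_natCast,
      PySem.List.slice_from_one]
    rw [show (blog_text.toList.take Ln).map enc = e.take Ln by
      simp [he, List.map_take]]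
    have hfoldmap :
        ((blog_text.toList.drop Ln).foldl
          (fun (st : List (List Int × Int) × List Int) c =>
            (st.1 ++ [(st.2, enc c)], (st.2 ++ [enc c]).tail))
          ([], e.take Ln)).1
        = ((e.drop Ln).foldl
          (fun (st : List (List Int × Int) × List Int) x =>
            (st.1 ++ [(st.2, x)], (st.2 ++ [x]).tail)) ([], e.take Ln)).1 := by
      rw [he, ← List.map_drop, List.foldl_map]
    rw [hfoldmap, pv_fold_eq_roll, List.nil_append, pv_roll_windows]
    have htake : (e.take Ln).length = Ln := by
      rw [List.length_take, he, List.length_map]; omega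
    have happ : e.take Ln ++ e.drop Ln = e := List.take_append_drop _ _
    have hlene : e.length = blog_text.toList.length := by rw [he]; simp
    -- A side: fold of appends becomes a map over the range
    rw [PySem.List.foldl_append_singleton_eq_map
      (f := fun i => ((PySem.List.slice blog_text.toList (some i) (some (i + (Ln:Int)))).map enc,
        enc ((PySem.Str.pyGet? blog_text (i + (Ln:Int))).getD ' ')))]
    rw [List.nil_append, hlen, PySem.List.pyRange_one]
    simp only [sub_zero, zero_add]
    have hm : ((blog_text.toList.length : Int) - (Ln : Int)).toNat = e.length - Ln := by
      rw [hlene]; omega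
    rw [hm]
    have hlendrop : (e.drop Ln).length = e.length - Ln := by simp
    rw [List.map_map, hlendrop]
    apply List.map_congr_left
    intro k hk
    rw [List.mem_range] at hk
    simp only [Function.comp, htake, happ, Prod.mk.injEq]
    have hidx : k + Ln < blog_text.toList.length := by omega
    have hkcast : ((k : Int) + (Ln : Int)) = ((k + Ln : Nat) : Int) := by push_cast; ring
    constructor
    · -- window component
      rw [← pv_slice_map, ← he, PySem.List.slice_natCast_add]
    · -- output component
      rw [hkcast, pv_str_get _ _ hidx]
      have hgete : e[k + Ln]? = some (enc (blog_text.toList[k + Ln])) := by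
        rw [he, List.getElem?_map, List.getElem?_eq_getElem hidx, Option.map_some]
      rw [hgete]
      rfl
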